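-- pv_equiv track=rewrite | github.com/TRISHANT131104/Air-Nyaya-Bharat-Bricks | flask-hello-world-app/flask-hello-world-app/app.py | is_flight_related
-- ===== SOURCE A (Python) =====
-- FLIGHT_KEYWORDS = [
--     'flight', 'flights', 'airline', 'airlines', 'airport',
--     'cancellation', 'cancelled', 'cancel', 'canceling',
--     'delay', 'delayed', 'delaying',
--     'boarding', 'boarded', 'denied boarding',
--     'downgrade', 'downgraded', 'class change',
--     'refund', 'compensation', 'ticket',
--     'indigo', 'air india', 'spicejet', 'vistara', 'go first', 'akasa'
-- ]
--
-- def is_flight_related(message: str) -> bool: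
--     """
--     Detect if a message is about flight issues.
--     Returns True if message contains flight-related keywords.
--     """
--     message_lower = message.lower()
--
--     # Check for flight keywords
--     for keyword in FLIGHT_KEYWORDS:
--         if keyword in message_lower:
--             return True
--
--     # Common greetings and general queries (not flight-related)
--     greetings = ['hi', 'hello', 'hey', 'good morning', 'good afternoon', 'good evening']
--     simple_greetings = [g for g in greetings if message_lower.strip() in [g, g + '!', g + '.']]
--
--     if simple_greetings:
--         return False
--
--     # If message is very short and doesn't contain flight keywords, likely not flight-related
--     if len(message.split()) <= 3 and not any(kw in message_lower for kw in FLIGHT_KEYWORDS[:10]):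
--         return False
--
--     return False  # Default to not flight-related to avoid false positives
-- ===== SOURCE B (Python) =====
-- FLIGHT_KEYWORDS = [
--     'flight', 'flights', 'airline', 'airlines', 'airport',
--     'cancellation', 'cancelled', 'cancel', 'canceling',
--     'delay', 'delayed', 'delaying',
--     'boarding', 'boarded', 'denied boarding',
--     'downgrade', 'downgraded', 'class change',
--     'refund', 'compensation', 'ticket',
--     'indigo', 'air india', 'spicejet', 'vistara', 'go first', 'akasa'
-- ]
--
-- def is_flight_related(message: str) -> bool:
--     """Single left-to-right scan: at each position of the lowered message,
--     check whether some flight keyword starts there."""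
--     m = message.lower()
--     for i in range(len(m) + 1):
--         for kw in FLIGHT_KEYWORDS:
--             if m.startswith(kw, i):
--                 return True
--     return False
-- ===== Notes on version B (the rewrite author's own statement) =====
-- stated objective: alternative
-- what changed: Replaced A's keyword-outer loop (a full substring search per keyword, plus dead greeting/short-message branches that all return False) by a single position-outer scan of the lowered message that tests which keyword starts at each index, with no dead code.
import Mathlib
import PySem

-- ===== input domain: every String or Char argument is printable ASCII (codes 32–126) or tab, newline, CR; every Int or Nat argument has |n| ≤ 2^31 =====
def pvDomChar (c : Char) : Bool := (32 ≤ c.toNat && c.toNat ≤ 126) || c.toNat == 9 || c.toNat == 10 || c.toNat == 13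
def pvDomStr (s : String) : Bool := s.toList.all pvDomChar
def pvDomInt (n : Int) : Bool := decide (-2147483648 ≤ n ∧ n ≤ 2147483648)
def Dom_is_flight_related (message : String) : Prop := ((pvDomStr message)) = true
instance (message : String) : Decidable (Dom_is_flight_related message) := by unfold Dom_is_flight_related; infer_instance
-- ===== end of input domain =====

-- B replaces A's keyword-outer substring loop (and its dead greeting / short-message
-- branches, which all return False) by a single position-outer scan of the lowered
-- message testing which keyword starts at each index; objective: alternative.

-- ===== PORT A =====
def FLIGHT_KEYWORDS : List String :=
  ["flight", "flights", "airline", "airlines", "airport",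
   "cancellation", "cancelled", "cancel", "canceling",
   "delay", "delayed", "delaying",
   "boarding", "boarded", "denied boarding",
   "downgrade", "downgraded", "class change",
   "refund", "compensation", "ticket",
   "indigo", "air india", "spicejet", "vistara", "go first", "akasa"]

def is_flight_related (message : String) : Bool :=
  let message_lower := PySem.Str.lower message
  -- for keyword in FLIGHT_KEYWORDS: if keyword in message_lower: return True
  if FLIGHT_KEYWORDS.any (fun keyword => PySem.Str.isIn keyword message_lower) then true
  else
    let greetings : List String := ["hi", "hello", "hey", "good morning", "good afternoon", "good evening"]
    -- g + '!' / g + '.' ported with Lean's ++ on String: exact for these literal appends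
    let simple_greetings := greetings.filter
      (fun g => [g, g ++ "!", g ++ "."].contains (PySem.Str.strip message_lower))
    if simple_greetings ≠ [] then false
    else if decide ((PySem.Str.split₀ message).length ≤ 3)
            && !((FLIGHT_KEYWORDS.take 10).any (fun kw => PySem.Str.isIn kw message_lower)) then false
    else false

-- ===== PORT B =====
def is_flight_related_alt (message : String) : Bool :=
  let m := (PySem.Str.lower message).toList
  -- m.startswith(kw, i) with 0 ≤ i ≤ len(m) is exactly startswith on m[i:] = m.drop i
  (List.range (m.length + 1)).any (fun i =>
    FLIGHT_KEYWORDS.any (fun kw => PySem.Chars.startswith (m.drop i) kw.toList))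

-- ===== PRECONDITION & SPEC =====
def Spec_is_flight_related (message : String) (out : Bool) : Prop := out = is_flight_related_alt message
instance (message : String) (out : Bool) : Decidable (Spec_is_flight_related message out) := by unfold Spec_is_flight_related; infer_instance

-- ===== CLAIM (what is proved, stated in full; the proofs are below) =====
def Claim_equal_is_flight_related : Prop := ∀ (message : String), Dom_is_flight_related message → Spec_is_flight_related message (is_flight_related message)

-- ===== LEMMAS AND PROOFS =====

-- A's keyword-outer containment loop equals B's position-outer startswith scan.
lemma scan_eq (kws : List String) (m : List Char) :
    kws.any (fun kw => PySem.Chars.isIn kw.toList m) =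
    (List.range (m.length + 1)).any (fun i =>
      kws.any (fun kw => PySem.Chars.startswith (m.drop i) kw.toList)) := by
  rw [Bool.eq_iff_iff]
  simp only [List.any_eq_true, List.mem_range, PySem.Chars.startswith_iff]
  constructor
  · rintro ⟨kw, hkw, hin⟩
    obtain ⟨j, hj⟩ := (PySem.Chars.exists_prefix_drop_iff_isIn kw.toList m).mpr hin
    refine ⟨min j m.length, by omega, kw, hkw, ?_⟩
    rcases Nat.lt_or_ge m.length j with hgt | hle
    · have hnil : m.drop j = [] := List.drop_eq_nil_of_le (Nat.le_of_lt hgt)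
      have : kw.toList = [] := List.prefix_nil.mp (hnil ▸ hj)
      simp [this]
    · simpa [min_eq_left hle] using hj
  · rintro ⟨i, _, kw, hkw, hpre⟩
    exact ⟨kw, hkw, (PySem.Chars.exists_prefix_drop_iff_isIn kw.toList m).mp ⟨i, hpre⟩⟩

-- A's trailing greeting / short-message branches all return False.
lemma is_flight_related_eq_any (message : String) :
    is_flight_related message =
      FLIGHT_KEYWORDS.any (fun kw => PySem.Str.isIn kw (PySem.Str.lower message)) := by
  unfold is_flight_related
  simp only []
  split_ifs with h1 h2 h3 <;> simp_all

-- ===== VERDICT (by name: the statement is the Claim_ definition above) =====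
theorem is_flight_related_spec : Claim_equal_is_flight_related := by
  intro message _
  show is_flight_related message = is_flight_related_alt message
  rw [is_flight_related_eq_any, is_flight_related_alt]
  simpa only [PySem.Str.isIn_eq] using
    scan_eq FLIGHT_KEYWORDS (PySem.Str.lower message).toList
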